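-- pv_equiv track=rewrite | github.com/GGbb2046/ST018 | Assignments/Assignment05/Part01.py | Strcon
-- ===== SOURCE A (Python) =====
-- def Strcon(string):
--     Astring = " "
--     for count, ch in enumerate(string):
--         if count%2 == 0:
--             Astring +=ch.upper()
--         else:
--             Astring +=ch.lower()
--
--     return Astring
-- ===== SOURCE B (Python) =====
-- def Strcon(string):
--     parts = [" "]
--     i = 0
--     n = len(string)
--     while i + 1 < n:
--         parts.append(string[i].upper() + string[i + 1].lower())
--         i += 2
--     if i < n:
--         parts.append(string[i].upper())
--     return "".join(parts)
-- ===== Notes on version B (the rewrite author's own statement) =====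
-- stated objective: alternative
-- what changed: Replaces the enumerate loop with a parity test on the index by a loop that consumes two characters per step (upper the first, lower the second, one trailing upper if odd length), so no index parity or modulus is ever computed.
import Mathlib
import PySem

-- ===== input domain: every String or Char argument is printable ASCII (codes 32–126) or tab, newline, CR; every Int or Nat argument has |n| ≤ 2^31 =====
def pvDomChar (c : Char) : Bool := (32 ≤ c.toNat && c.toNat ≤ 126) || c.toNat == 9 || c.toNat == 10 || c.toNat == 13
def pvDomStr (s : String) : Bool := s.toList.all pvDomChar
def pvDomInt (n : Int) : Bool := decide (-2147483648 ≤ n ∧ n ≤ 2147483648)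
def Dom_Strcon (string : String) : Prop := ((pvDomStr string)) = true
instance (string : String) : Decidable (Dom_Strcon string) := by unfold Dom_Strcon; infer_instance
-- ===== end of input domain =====

-- B replaces A's enumerate loop (parity test on the index, string accumulator) by a
-- pass consuming two characters per step: no index parity or modulus is computed.
-- Alternative decomposition of the same O(n) task; exact on ASCII (char-wise upper/lower).

-- ===== PORT A =====
-- A: fold over enumerate(string), branching on count % 2, appending to the accumulator " ".
def Strcon (string : String) : String :=
  String.ofList
    ((PySem.List.enumerate string.toList 0).foldl
      (fun acc p =>
        if PySem.Int.mod p.1 2 == 0 then acc ++ [PySem.Chars.upperChar p.2]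
        else acc ++ [PySem.Chars.lowerChar p.2])
      [' '])

-- ===== PORT B =====
-- B's two-at-a-time pass (Source B's while loop over the remaining characters):
-- upper the first char, lower the second, continue on the rest; one trailing upper if odd.
def StrconPairs : List Char → List Char
  | a :: b :: t => PySem.Chars.upperChar a :: PySem.Chars.lowerChar b :: StrconPairs t
  | [a] => [PySem.Chars.upperChar a]
  | [] => []

def Strcon_alt (string : String) : String :=
  String.ofList (' ' :: StrconPairs string.toList)

-- ===== PRECONDITION & SPEC =====
def Spec_Strcon (string : String) (out : String) : Prop := out = Strcon_alt string
instance (string : String) (out : String) : Decidable (Spec_Strcon string out) := by unfold Spec_Strcon; infer_instance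

-- ===== CLAIM (what is proved, stated in full; the proofs are below) =====
def Claim_equal_Strcon : Prop := ∀ (string : String), Dom_Strcon string → Spec_Strcon string (Strcon string)

-- ===== LEMMAS AND PROOFS =====

theorem Strcon_key (xs : List Char) : ∀ (n : ℕ) (acc : List Char),
    (PySem.List.enumerate xs (2 * (n : Int))).foldl
      (fun acc p =>
        if PySem.Int.mod p.1 2 == 0 then acc ++ [PySem.Chars.upperChar p.2]
        else acc ++ [PySem.Chars.lowerChar p.2]) acc
    = acc ++ StrconPairs xs := by
  induction xs using StrconPairs.induct with
  | case1 a b t ih =>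
    intro n acc
    have h1 : PySem.Int.mod (2 * (n : Int)) 2 = 0 := by
      simp [PySem.Int.mod, Int.fmod_eq_emod]
    have h2 : PySem.Int.mod (2 * (n : Int) + 1) 2 = 1 := by
      simp [PySem.Int.mod, Int.fmod_eq_emod]
    have h3 : 2 * (n : Int) + 1 + 1 = 2 * ((n + 1 : ℕ) : Int) := by push_cast; ring
    simp only [PySem.List.enumerate_cons, List.foldl_cons, h1, h2, h3]
    rw [ih (n + 1)]
    simp [StrconPairs]
  | case2 a =>
    intro n acc
    have h1 : PySem.Int.mod (2 * (n : Int)) 2 = 0 := by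
      simp [PySem.Int.mod, Int.fmod_eq_emod]
    simp [PySem.List.enumerate_cons, PySem.List.enumerate_nil, StrconPairs]
  | case3 =>
    intro n acc
    simp [PySem.List.enumerate_nil, StrconPairs]

-- ===== VERDICT (by name: the statement is the Claim_ definition above) =====
theorem Strcon_spec : Claim_equal_Strcon := by
  intro s _
  unfold Spec_Strcon Strcon Strcon_alt
  have := Strcon_key s.toList 0 [' ']
  simpa using congrArg String.ofList this
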